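-- pv_equiv track=rewrite | github.com/semanurcetintas/client-server- | client.py | vernam_encrypt
-- ===== SOURCE A (Python) =====
-- def _vernam_clean_key(key: str) -> str:
--     if not key or not key.isalpha():
--         raise ValueError("Vernam anahtarı sadece harflerden oluşmalı (örn: SECRETKEY).")
--     return key
--
-- def vernam_encrypt(text: str, key: str) -> str:
--     key = _vernam_clean_key(key)
--     out = []
--     ki = 0
--     for ch in text:
--         if ch.isalpha():
--             if ki >= len(key):
--                 raise ValueError("Vernam anahtarı mesaj kadar uzun olmalı (daha uzun olabilir, ama kısa olamaz).")
--             kshift = (ord(key[ki].upper()) - 65) % 26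
--             if ch.isupper():
--                 cnum = ((ord(ch) - 65) + kshift) % 26
--                 out.append(chr(cnum + 65))
--             else:
--                 cnum = ((ord(ch) - 97) + kshift) % 26
--                 out.append(chr(cnum + 97))
--             ki += 1
--         else:
--             out.append(ch)
--     return "".join(out)
-- ===== SOURCE B (Python) =====
-- _AL = "ABCDEFGHIJKLMNOPQRSTUVWXYZ"
-- _al = "abcdefghijklmnopqrstuvwxyz"
--
-- def _vernam_clean_key(key: str) -> str:
--     if not key or not key.isalpha():
--         raise ValueError("Vernam anahtarı sadece harflerden oluşmalı (örn: SECRETKEY).")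
--     return key
--
-- def vernam_encrypt(text: str, key: str) -> str:
--     key = _vernam_clean_key(key)
--     positions = [i for i, c in enumerate(text) if c.isalpha()]
--     if len(positions) > len(key):
--         raise ValueError("Vernam anahtarı mesaj kadar uzun olmalı (daha uzun olabilir, ama kısa olamaz).")
--     out = list(text)
--     for pos, k in zip(positions, key):
--         c = text[pos]
--         row = (_AL.index(c.upper()) + _AL.index(k.upper())) % 26
--         out[pos] = _AL[row] if c.isupper() else _al[row]
--     return "".join(out)
-- ===== Notes on version B (the rewrite author's own statement) =====
-- stated objective: alternative
-- what changed: Replaces A's single index-threaded ord/chr pass with: collect the alpha positions via enumerate, check the length once up front, then overwrite a mutable list copy of the text at those positions using tabula-recta lookups (str.index into the alphabet strings) instead of modular ord arithmetic.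
import Mathlib
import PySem

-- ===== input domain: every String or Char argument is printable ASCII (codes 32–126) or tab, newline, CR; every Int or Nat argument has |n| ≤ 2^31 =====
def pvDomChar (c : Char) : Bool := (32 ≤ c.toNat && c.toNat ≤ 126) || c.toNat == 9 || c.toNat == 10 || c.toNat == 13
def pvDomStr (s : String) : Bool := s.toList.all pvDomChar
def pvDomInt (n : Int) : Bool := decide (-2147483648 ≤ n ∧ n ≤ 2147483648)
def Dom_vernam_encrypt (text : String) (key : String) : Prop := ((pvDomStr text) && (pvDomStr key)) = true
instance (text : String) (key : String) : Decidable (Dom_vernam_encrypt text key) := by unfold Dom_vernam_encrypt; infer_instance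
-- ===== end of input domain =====

-- B replaces A's single index-threaded arithmetic pass by: collect the alpha POSITIONS, check the
-- length once, then overwrite a mutable copy of the text at those positions using tabula-recta
-- lookups into the alphabet strings (str.index / indexing) instead of ord/chr arithmetic.


-- ===== PORT A =====
-- the loop of A: out accumulated head-first; ki is the key index.
-- where Python raises (ki ≥ len(key), excluded by Pre_) the port reads a dummy 'A' via getD.
def vernamLoopA (key : List Char) : List Char → Nat → List Char
  | [], _ => []
  | ch :: rest, ki =>
    if PySem.Chars.isalpha ch then
      let kshift := ((PySem.Chars.upperChar (key.getD ki 'A')).toNat - 65) % 26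
      if PySem.Chars.isupper ch then
        Char.ofNat (((ch.toNat - 65) + kshift) % 26 + 65) :: vernamLoopA key rest (ki + 1)
      else
        Char.ofNat (((ch.toNat - 97) + kshift) % 26 + 97) :: vernamLoopA key rest (ki + 1)
    else ch :: vernamLoopA key rest ki

-- _vernam_clean_key raises on empty/non-alpha key (excluded by Pre_): the port returns "" there.
def vernam_encrypt (text : String) (key : String) : String :=
  if PySem.Str.strIsalpha key = false then ""
  else String.ofList (vernamLoopA key.toList text.toList 0)

-- ===== PORT B =====
-- [i for i, c in enumerate(text) if c.isalpha()]
def posAlphaB : List Char → Nat → List Nat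
  | [], _ => []
  | c :: cs, i => if PySem.Chars.isalpha c then i :: posAlphaB cs (i + 1) else posAlphaB cs (i + 1)

-- one table lookup: row = (_AL.index(c.upper()) + _AL.index(k.upper())) % 26; _AL[row] / _al[row].
-- str.index is exact here as List.idxOf (both upper-cased letters occur in _AL, so it never raises),
-- and the indexings _AL[row] / _al[row] are exact as getD (row < 26 always).
def encTabB (c : Char) (k : Char) : Char :=
  let AL := "ABCDEFGHIJKLMNOPQRSTUVWXYZ".toList
  let al := "abcdefghijklmnopqrstuvwxyz".toList
  let row := (AL.idxOf (PySem.Chars.upperChar c) + AL.idxOf (PySem.Chars.upperChar k)) % 26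
  if PySem.Chars.isupper c then AL.getD row ' ' else al.getD row ' '

-- B raises the same two ValueErrors as A (excluded by Pre_): the port returns "" there.
def vernam_encrypt_alt (text : String) (key : String) : String :=
  if PySem.Str.strIsalpha key = false then ""
  else
    let ts := text.toList
    let positions := posAlphaB ts 0
    if key.toList.length < positions.length then ""
    else String.ofList ((positions.zip key.toList).foldl
      (fun out pk => out.set pk.1 (encTabB (ts.getD pk.1 ' ') pk.2)) ts)

-- ===== PRECONDITION & SPEC =====
-- Pre_ excludes exactly the inputs where A raises ValueError: an empty or non-alpha key,
-- or more alphabetic characters in text than the key has letters.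
def Pre_vernam_encrypt (text : String) (key : String) : Prop :=
  PySem.Str.strIsalpha key = true ∧
  (text.toList.filter (fun c => PySem.Chars.isalpha c)).length ≤ key.toList.length
instance (text : String) (key : String) : Decidable (Pre_vernam_encrypt text key) := by
  unfold Pre_vernam_encrypt; infer_instance

def pvWitness_vernam_encrypt : String × String := ("Hi there!", "SECRETKEY")

def Spec_vernam_encrypt (text : String) (key : String) (out : String) : Prop := out = vernam_encrypt_alt text key
instance (text : String) (key : String) (out : String) : Decidable (Spec_vernam_encrypt text key out) := by unfold Spec_vernam_encrypt; infer_instance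

-- ===== CLAIM =====
def Claim_equal_vernam_encrypt : Prop := ∀ (text : String) (key : String), Dom_vernam_encrypt text key → Pre_vernam_encrypt text key → Spec_vernam_encrypt text key (vernam_encrypt text key)

-- ===== LEMMAS AND PROOFS =====
lemma isupper_bounds (c : Char) (h : PySem.Chars.isupper c = true) :
    65 ≤ c.toNat ∧ c.toNat ≤ 90 := by
  simp only [PySem.Chars.isupper, Bool.and_eq_true, decide_eq_true_eq, Char.le_def,
    UInt32.le_iff_toNat_le, Char.toNat_val] at h
  have hA : 'A'.toNat = 65 := by decide
  have hZ : 'Z'.toNat = 90 := by decide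
  omega

lemma islower_bounds (c : Char) (h : PySem.Chars.islower c = true) :
    97 ≤ c.toNat ∧ c.toNat ≤ 122 := by
  simp only [PySem.Chars.islower, Bool.and_eq_true, decide_eq_true_eq, Char.le_def,
    UInt32.le_iff_toNat_le, Char.toNat_val] at h
  have ha : 'a'.toNat = 97 := by decide
  have hz : 'z'.toNat = 122 := by decide
  omega

lemma upperChar_of_islower (c : Char) (h : PySem.Chars.islower c = true) :
    (PySem.Chars.upperChar c).toNat = c.toNat - 32 := by
  have hb := islower_bounds c h
  have hv : (c.toNat - 32).isValidChar := Or.inl (by omega)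
  rw [PySem.Chars.upperChar, if_pos h, Char.toNat_ofNat, if_pos hv]

lemma upperChar_of_isupper (c : Char) (h : PySem.Chars.isupper c = true) :
    PySem.Chars.upperChar c = c := by
  have hb := isupper_bounds c h
  have hnl : PySem.Chars.islower c = false := by
    simp only [PySem.Chars.islower, Bool.and_eq_false_iff, decide_eq_false_iff_not,
      Char.le_def, UInt32.le_iff_toNat_le, Char.toNat_val]
    have ha : 'a'.toNat = 97 := by decide
    exact Or.inl (by omega)
  rw [PySem.Chars.upperChar, if_neg (by simp [hnl])]

lemma upperChar_bounds (c : Char) (h : PySem.Chars.isalpha c = true) :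
    65 ≤ (PySem.Chars.upperChar c).toNat ∧ (PySem.Chars.upperChar c).toNat ≤ 90 := by
  rcases Bool.or_eq_true_iff.mp (by simpa [PySem.Chars.isalpha] using h) with hu | hl
  · rw [upperChar_of_isupper c hu]; exact isupper_bounds c hu
  · rw [upperChar_of_islower c hl]; have := islower_bounds c hl; omega

lemma idxOf_AL (n : Nat) (h1 : 65 ≤ n) (h2 : n ≤ 90) :
    List.idxOf (Char.ofNat n) "ABCDEFGHIJKLMNOPQRSTUVWXYZ".toList = n - 65 := by
  interval_cases n <;> decide

lemma idxOf_AL' (c : Char) (h1 : 65 ≤ c.toNat) (h2 : c.toNat ≤ 90) :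
    List.idxOf c "ABCDEFGHIJKLMNOPQRSTUVWXYZ".toList = c.toNat - 65 := by
  have h := idxOf_AL c.toNat h1 h2
  rwa [Char.ofNat_toNat] at h

lemma getD_AL (r : Nat) (h : r < 26) :
    "ABCDEFGHIJKLMNOPQRSTUVWXYZ".toList.getD r ' ' = Char.ofNat (r + 65) := by
  interval_cases r <;> decide

lemma getD_al (r : Nat) (h : r < 26) :
    "abcdefghijklmnopqrstuvwxyz".toList.getD r ' ' = Char.ofNat (r + 97) := by
  interval_cases r <;> decide

-- the tabula-recta lookup computes A's shift arithmetic, character by character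
lemma encTabB_eq (c k : Char) (hc : PySem.Chars.isalpha c = true) (hk : PySem.Chars.isalpha k = true) :
    encTabB c k =
      if PySem.Chars.isupper c then
        Char.ofNat (((c.toNat - 65) + ((PySem.Chars.upperChar k).toNat - 65) % 26) % 26 + 65)
      else
        Char.ofNat (((c.toNat - 97) + ((PySem.Chars.upperChar k).toNat - 65) % 26) % 26 + 97) := by
  obtain ⟨hk1, hk2⟩ := upperChar_bounds k hk
  have hik : List.idxOf (PySem.Chars.upperChar k) "ABCDEFGHIJKLMNOPQRSTUVWXYZ".toList
      = (PySem.Chars.upperChar k).toNat - 65 := idxOf_AL' _ hk1 hk2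
  have hkm : ((PySem.Chars.upperChar k).toNat - 65) % 26 = (PySem.Chars.upperChar k).toNat - 65 :=
    Nat.mod_eq_of_lt (by omega)
  unfold encTabB
  by_cases hu : PySem.Chars.isupper c = true
  · obtain ⟨hc1, hc2⟩ := isupper_bounds c hu
    have hic : List.idxOf (PySem.Chars.upperChar c) "ABCDEFGHIJKLMNOPQRSTUVWXYZ".toList
        = c.toNat - 65 := by rw [upperChar_of_isupper c hu]; exact idxOf_AL' c hc1 hc2
    simp only [hu, if_pos, hic, hik, hkm]
    rw [getD_AL _ (Nat.mod_lt _ (by omega))]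
  · have hl : PySem.Chars.islower c = true := by
      rcases Bool.or_eq_true_iff.mp (by simpa [PySem.Chars.isalpha] using hc) with h | h
      · exact absurd h hu
      · exact h
    obtain ⟨hc1, hc2⟩ := islower_bounds c hl
    have hic : List.idxOf (PySem.Chars.upperChar c) "ABCDEFGHIJKLMNOPQRSTUVWXYZ".toList
        = c.toNat - 97 := by
      rw [idxOf_AL' _ (by rw [upperChar_of_islower c hl]; omega)
        (by rw [upperChar_of_islower c hl]; omega), upperChar_of_islower c hl]
      omega
    simp only [hu, hic, hik, hkm, Bool.false_eq_true, if_false]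
    rw [getD_al _ (Nat.mod_lt _ (by omega))]

lemma posAlphaB_succ (cs : List Char) : ∀ i, posAlphaB cs (i + 1) = (posAlphaB cs i).map (· + 1) := by
  induction cs with
  | nil => intro i; simp [posAlphaB]
  | cons c cs ih =>
    intro i
    by_cases hc : PySem.Chars.isalpha c = true <;> simp [posAlphaB, hc, ih (i + 1)]

lemma posAlphaB_length (cs : List Char) :
    ∀ i, (posAlphaB cs i).length = (cs.filter (fun c => PySem.Chars.isalpha c)).length := by
  induction cs with
  | nil => intro i; simp [posAlphaB]
  | cons c cs ih =>
    intro i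
    by_cases hc : PySem.Chars.isalpha c = true <;> simp [posAlphaB, hc, ih]

-- every position in the fold is ≥ 1, so the head of both the read and the write list passes through
lemma foldB_cons (b c : Char) (ts' : List Char) :
    ∀ (qs : List Nat) (ks rest : List Char),
      ((qs.map (· + 1)).zip ks).foldl
        (fun out pk => out.set pk.1 (encTabB ((c :: ts').getD pk.1 ' ') pk.2)) (b :: rest)
      = b :: (qs.zip ks).foldl
        (fun out pk => out.set pk.1 (encTabB (ts'.getD pk.1 ' ') pk.2)) rest := by
  intro qs
  induction qs with
  | nil => intro ks rest; simp
  | cons q qs ih =>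
    intro ks rest
    cases ks with
    | nil => simp
    | cons k ks =>
      simp only [List.zip_cons_cons, List.foldl_cons]
      exact ih ks _

-- A's index-threaded loop equals B's position-overwrite fold on the key suffix from ki
lemma loopA_eq_foldB (key : List Char) (hk : ∀ x ∈ key, PySem.Chars.isalpha x = true) :
    ∀ (cs : List Char) (ki : Nat),
      ki + (cs.filter (fun c => PySem.Chars.isalpha c)).length ≤ key.length →
      vernamLoopA key cs ki
        = ((posAlphaB cs 0).zip (key.drop ki)).foldl
            (fun out pk => out.set pk.1 (encTabB (cs.getD pk.1 ' ') pk.2)) cs := by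
  intro cs
  induction cs with
  | nil => intro ki _; simp [vernamLoopA, posAlphaB]
  | cons c cs ih =>
    intro ki h
    by_cases hc : PySem.Chars.isalpha c = true
    · have hfil : ((c :: cs).filter (fun c => PySem.Chars.isalpha c)).length
          = (cs.filter (fun c => PySem.Chars.isalpha c)).length + 1 := by simp [hc]
      have hki : ki < key.length := by omega
      have hdrop : key.drop ki = key[ki] :: key.drop (ki + 1) := List.drop_eq_getElem_cons hki
      have hpos : posAlphaB (c :: cs) 0 = 0 :: (posAlphaB cs 0).map (· + 1) := by
        simp [posAlphaB, hc, posAlphaB_succ cs 0]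
      rw [hpos, hdrop]
      simp only [List.zip_cons_cons, List.foldl_cons]
      have hstep : ((c :: cs).set 0 (encTabB ((c :: cs).getD 0 ' ') key[ki]))
          = encTabB c key[ki] :: cs := by simp
      rw [hstep, foldB_cons, ← ih (ki + 1) (by omega)]
      have hkalpha : PySem.Chars.isalpha key[ki] = true := hk _ (List.getElem_mem hki)
      rw [vernamLoopA]
      simp only [hc, if_pos]
      have hgd : key.getD ki 'A' = key[ki] := List.getD_eq_getElem key 'A' hki
      rw [encTabB_eq c key[ki] hc hkalpha, hgd]
      by_cases hu : PySem.Chars.isupper c = true <;> simp [hu]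
    · have hpos : posAlphaB (c :: cs) 0 = (posAlphaB cs 0).map (· + 1) := by
        simp [posAlphaB, hc, posAlphaB_succ cs 0]
      rw [hpos, foldB_cons, vernamLoopA.eq_def]
      simp only [hc, Bool.false_eq_true, if_false]
      have hlen : ki + (cs.filter (fun c => PySem.Chars.isalpha c)).length ≤ key.length := by
        simp only [List.filter_cons, hc] at h; simpa using h
      exact congrArg (c :: ·) (ih ki hlen)

-- ===== VERDICT =====
theorem vernam_encrypt_spec : Claim_equal_vernam_encrypt := by
  intro text key _ hpre
  obtain ⟨hk, hlen⟩ := hpre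
  unfold Spec_vernam_encrypt vernam_encrypt vernam_encrypt_alt
  rw [hk]
  simp only [Bool.true_eq_false, if_false]
  rw [if_neg (by rw [posAlphaB_length]; omega)]
  have hka : ∀ x ∈ key.toList, PySem.Chars.isalpha x = true := by
    have := hk
    simp only [PySem.Str.strIsalpha_eq, PySem.Chars.strIsalpha, Bool.and_eq_true,
      List.all_eq_true] at this
    exact fun x hx => this.2 x hx
  rw [loopA_eq_foldB key.toList hka text.toList 0 (by simpa using hlen)]
  simp
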